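-- pv_equiv track=rewrite | github.com/Billnguyenh/portal-config-parser | win_parser/winsys.py | parseSystemSpecifications
-- ===== SOURCE A (Python) =====
-- def parseSystemSpecifications(section:list) -> dict:
--     configs = {
--         'hostname': "",
--         'osName': "",
--         'osVersion': "",
--         'osConfiguration': "",
--         'osManufacturer': "",
--         'systemModel': "",
--         'systemType': "",
--         'domainName': "",
--     }
--     for line in section:
--         if ("Host Name:" in line and configs['hostname'] == ""):
--             hostname = line.replace('Host Name:','').strip().lower()
--             configs['hostname'] = hostname
--         if ("OS Name:" in line and configs['osName'] == ""):
--             osName = line.replace('OS Name:','').strip()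
--             configs['osName'] = osName
--         if ("OS Version:" in line and configs['osVersion'] == ""):
--             osVersion = line.replace("OS Version:","").strip()
--             configs["osVersion"] = osVersion
--         if ("OS Configuration:" in line and configs['osConfiguration'] == ""):
--             osConfiguration = line.replace("OS Configuration:","").strip()
--             configs["osConfiguration"] = osConfiguration
--         if ("System Manufacturer:" in line and configs['osManufacturer'] == ""):
--             osManufacturer = line.replace("System Manufacturer:","").strip()
--             configs['osManufacturer'] = osManufacturer
--         if ("System Model:" in line and configs['systemModel'] == ""):
--             systemModel = line.replace("System Model:","").strip()
--             configs['systemModel'] = systemModel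
--         if ("System Type:" in line and configs['systemType'] == ""):
--             systemType = line.replace("System Type:","").strip()
--             configs['systemType'] = systemType
--         if ("Domain:" in line and configs['domainName'] == ""):
--             domainName = line.replace("Domain:","").strip()
--             configs['domainName'] = domainName
--     return configs
-- ===== SOURCE B (Python) =====
-- FIELDS = [
--     ('hostname', 'Host Name:', True),
--     ('osName', 'OS Name:', False),
--     ('osVersion', 'OS Version:', False),
--     ('osConfiguration', 'OS Configuration:', False),
--     ('osManufacturer', 'System Manufacturer:', False),
--     ('systemModel', 'System Model:', False),
--     ('systemType', 'System Type:', False),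
--     ('domainName', 'Domain:', False),
-- ]
--
-- def _first_value(section, marker, lower):
--     # first line containing the marker whose extracted value is non-empty
--     for line in section:
--         if marker in line:
--             value = line.replace(marker, '').strip()
--             if lower:
--                 value = value.lower()
--             if value:
--                 return value
--     return ""
--
-- def parseSystemSpecifications(section: list) -> dict:
--     return {key: _first_value(section, marker, lower)
--             for key, marker, lower in FIELDS}
-- ===== Notes on version B (the rewrite author's own statement) =====
-- stated objective: simpler
-- what changed: B is field-major: a data table of (key, marker, lowercase) entries and a single helper that scans the section for the first line whose extracted value is non-empty, replacing A's line-major loop over a mutable dict with eight hand-written if-blocks.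
import Mathlib
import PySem

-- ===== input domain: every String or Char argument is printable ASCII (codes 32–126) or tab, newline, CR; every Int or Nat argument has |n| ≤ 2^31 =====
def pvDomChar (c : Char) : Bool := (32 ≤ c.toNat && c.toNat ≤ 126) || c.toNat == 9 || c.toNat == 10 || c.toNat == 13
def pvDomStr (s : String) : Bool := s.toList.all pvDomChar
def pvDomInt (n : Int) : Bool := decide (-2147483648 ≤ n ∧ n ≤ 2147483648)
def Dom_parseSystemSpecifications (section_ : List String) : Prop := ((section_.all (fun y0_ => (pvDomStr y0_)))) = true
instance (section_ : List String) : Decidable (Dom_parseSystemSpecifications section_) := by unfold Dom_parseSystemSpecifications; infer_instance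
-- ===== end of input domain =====

-- B re-implements the parse field-major (for each field, first line whose extracted value is
-- non-empty) instead of A's line-major loop over a mutable dict; objective: simpler, same cost.

-- ===== PORT A =====
-- one iteration of A's `for line in section` body (8 independent if-statements on the dict)
def pvStepA (configs : PySem.Dict String String) (line : String) : PySem.Dict String String :=
  let configs := if PySem.Str.isIn "Host Name:" line && (configs.getD "hostname" "" == "") then
      configs.insert "hostname" (PySem.Str.lower (PySem.Str.strip (PySem.Str.replace line "Host Name:" ""))) else configs
  let configs := if PySem.Str.isIn "OS Name:" line && (configs.getD "osName" "" == "") then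
      configs.insert "osName" (PySem.Str.strip (PySem.Str.replace line "OS Name:" "")) else configs
  let configs := if PySem.Str.isIn "OS Version:" line && (configs.getD "osVersion" "" == "") then
      configs.insert "osVersion" (PySem.Str.strip (PySem.Str.replace line "OS Version:" "")) else configs
  let configs := if PySem.Str.isIn "OS Configuration:" line && (configs.getD "osConfiguration" "" == "") then
      configs.insert "osConfiguration" (PySem.Str.strip (PySem.Str.replace line "OS Configuration:" "")) else configs
  let configs := if PySem.Str.isIn "System Manufacturer:" line && (configs.getD "osManufacturer" "" == "") then
      configs.insert "osManufacturer" (PySem.Str.strip (PySem.Str.replace line "System Manufacturer:" "")) else configs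
  let configs := if PySem.Str.isIn "System Model:" line && (configs.getD "systemModel" "" == "") then
      configs.insert "systemModel" (PySem.Str.strip (PySem.Str.replace line "System Model:" "")) else configs
  let configs := if PySem.Str.isIn "System Type:" line && (configs.getD "systemType" "" == "") then
      configs.insert "systemType" (PySem.Str.strip (PySem.Str.replace line "System Type:" "")) else configs
  let configs := if PySem.Str.isIn "Domain:" line && (configs.getD "domainName" "" == "") then
      configs.insert "domainName" (PySem.Str.strip (PySem.Str.replace line "Domain:" ""))  else configs
  configs

def parseSystemSpecifications (section_ : List String) : List (String × String) :=
  let configs : PySem.Dict String String := PySem.Dict.mk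
    [("hostname", ""), ("osName", ""), ("osVersion", ""), ("osConfiguration", ""),
     ("osManufacturer", ""), ("systemModel", ""), ("systemType", ""), ("domainName", "")]
  (section_.foldl pvStepA configs).items

-- ===== PORT B =====
-- Source B's _first_value: first line containing the marker whose extracted value is non-empty
def pvFirstValue (marker : String) (low : Bool) : List String → String
  | [] => ""
  | line :: rest =>
    if PySem.Str.isIn marker line then
      let value := PySem.Str.strip (PySem.Str.replace line marker "")
      let value := if low then PySem.Str.lower value else value
      if value ≠ "" then value else pvFirstValue marker low rest
    else pvFirstValue marker low rest

-- Source B's FIELDS table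
def pvFields : List (String × String × Bool) :=
  [("hostname", "Host Name:", true), ("osName", "OS Name:", false),
   ("osVersion", "OS Version:", false), ("osConfiguration", "OS Configuration:", false),
   ("osManufacturer", "System Manufacturer:", false), ("systemModel", "System Model:", false),
   ("systemType", "System Type:", false), ("domainName", "Domain:", false)]

def parseSystemSpecifications_alt (section_ : List String) : List (String × String) :=
  pvFields.map (fun f => (f.1, pvFirstValue f.2.1 f.2.2 section_))

-- ===== PRECONDITION & SPEC =====
def Spec_parseSystemSpecifications (section_ : List String) (out : List (String × String)) : Prop := out = parseSystemSpecifications_alt section_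
instance (section_ : List String) (out : List (String × String)) : Decidable (Spec_parseSystemSpecifications section_ out) := by unfold Spec_parseSystemSpecifications; infer_instance

-- ===== CLAIM (what is proved, stated in full; the proofs are below) =====
def Claim_equal_parseSystemSpecifications : Prop := ∀ (section_ : List String), Dom_parseSystemSpecifications section_ → Spec_parseSystemSpecifications section_ (parseSystemSpecifications section_)

-- ===== LEMMAS AND PROOFS =====

-- proof-side helpers
def mkD (v1 v2 v3 v4 v5 v6 v7 v8 : String) : PySem.Dict String String :=
  PySem.Dict.mk
    [("hostname", v1), ("osName", v2), ("osVersion", v3), ("osConfiguration", v4),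
     ("osManufacturer", v5), ("systemModel", v6), ("systemType", v7), ("domainName", v8)]

def pvParse (line m : String) (low : Bool) : String :=
  if low then PySem.Str.lower (PySem.Str.strip (PySem.Str.replace line m ""))
  else PySem.Str.strip (PySem.Str.replace line m "")

def pvOr (v w : String) : String := if v == "" then w else v

def pvUpd (v m line : String) (low : Bool) : String :=
  if PySem.Str.isIn m line && (v == "") then pvParse line m low else v


lemma getD_mk1 (v1 v2 v3 v4 v5 v6 v7 v8 : String) :
    (mkD v1 v2 v3 v4 v5 v6 v7 v8).getD "hostname" "" = v1 := by
  simp [mkD, PySem.Dict.getD, PySem.Dict.get?]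

lemma ins_mk1 (v1 v2 v3 v4 v5 v6 v7 v8 x : String) :
    (mkD v1 v2 v3 v4 v5 v6 v7 v8).insert "hostname" x = mkD x v2 v3 v4 v5 v6 v7 v8 := by
  simp [mkD, PySem.Dict.insert]

lemma getD_mk2 (v1 v2 v3 v4 v5 v6 v7 v8 : String) :
    (mkD v1 v2 v3 v4 v5 v6 v7 v8).getD "osName" "" = v2 := by
  simp [mkD, PySem.Dict.getD, PySem.Dict.get?]

lemma ins_mk2 (v1 v2 v3 v4 v5 v6 v7 v8 x : String) :
    (mkD v1 v2 v3 v4 v5 v6 v7 v8).insert "osName" x = mkD v1 x v3 v4 v5 v6 v7 v8 := by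
  simp [mkD, PySem.Dict.insert]

lemma getD_mk3 (v1 v2 v3 v4 v5 v6 v7 v8 : String) :
    (mkD v1 v2 v3 v4 v5 v6 v7 v8).getD "osVersion" "" = v3 := by
  simp [mkD, PySem.Dict.getD, PySem.Dict.get?]

lemma ins_mk3 (v1 v2 v3 v4 v5 v6 v7 v8 x : String) :
    (mkD v1 v2 v3 v4 v5 v6 v7 v8).insert "osVersion" x = mkD v1 v2 x v4 v5 v6 v7 v8 := by
  simp [mkD, PySem.Dict.insert]

lemma getD_mk4 (v1 v2 v3 v4 v5 v6 v7 v8 : String) :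
    (mkD v1 v2 v3 v4 v5 v6 v7 v8).getD "osConfiguration" "" = v4 := by
  simp [mkD, PySem.Dict.getD, PySem.Dict.get?]

lemma ins_mk4 (v1 v2 v3 v4 v5 v6 v7 v8 x : String) :
    (mkD v1 v2 v3 v4 v5 v6 v7 v8).insert "osConfiguration" x = mkD v1 v2 v3 x v5 v6 v7 v8 := by
  simp [mkD, PySem.Dict.insert]

lemma getD_mk5 (v1 v2 v3 v4 v5 v6 v7 v8 : String) :
    (mkD v1 v2 v3 v4 v5 v6 v7 v8).getD "osManufacturer" "" = v5 := by
  simp [mkD, PySem.Dict.getD, PySem.Dict.get?]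

lemma ins_mk5 (v1 v2 v3 v4 v5 v6 v7 v8 x : String) :
    (mkD v1 v2 v3 v4 v5 v6 v7 v8).insert "osManufacturer" x = mkD v1 v2 v3 v4 x v6 v7 v8 := by
  simp [mkD, PySem.Dict.insert]

lemma getD_mk6 (v1 v2 v3 v4 v5 v6 v7 v8 : String) :
    (mkD v1 v2 v3 v4 v5 v6 v7 v8).getD "systemModel" "" = v6 := by
  simp [mkD, PySem.Dict.getD, PySem.Dict.get?]

lemma ins_mk6 (v1 v2 v3 v4 v5 v6 v7 v8 x : String) :
    (mkD v1 v2 v3 v4 v5 v6 v7 v8).insert "systemModel" x = mkD v1 v2 v3 v4 v5 x v7 v8 := by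
  simp [mkD, PySem.Dict.insert]

lemma getD_mk7 (v1 v2 v3 v4 v5 v6 v7 v8 : String) :
    (mkD v1 v2 v3 v4 v5 v6 v7 v8).getD "systemType" "" = v7 := by
  simp [mkD, PySem.Dict.getD, PySem.Dict.get?]

lemma ins_mk7 (v1 v2 v3 v4 v5 v6 v7 v8 x : String) :
    (mkD v1 v2 v3 v4 v5 v6 v7 v8).insert "systemType" x = mkD v1 v2 v3 v4 v5 v6 x v8 := by
  simp [mkD, PySem.Dict.insert]

lemma getD_mk8 (v1 v2 v3 v4 v5 v6 v7 v8 : String) :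
    (mkD v1 v2 v3 v4 v5 v6 v7 v8).getD "domainName" "" = v8 := by
  simp [mkD, PySem.Dict.getD, PySem.Dict.get?]

lemma ins_mk8 (v1 v2 v3 v4 v5 v6 v7 v8 x : String) :
    (mkD v1 v2 v3 v4 v5 v6 v7 v8).insert "domainName" x = mkD v1 v2 v3 v4 v5 v6 v7 x := by
  simp [mkD, PySem.Dict.insert]

lemma condUpd1 (b : Bool) (v1 v2 v3 v4 v5 v6 v7 v8 x : String) :
    (if (b && (v1 == "")) = true then (mkD v1 v2 v3 v4 v5 v6 v7 v8).insert "hostname" x else mkD v1 v2 v3 v4 v5 v6 v7 v8)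
      = mkD (if (b && (v1 == "")) = true then x else v1) v2 v3 v4 v5 v6 v7 v8 := by
  split <;> simp_all [ins_mk1]

lemma condUpd2 (b : Bool) (v1 v2 v3 v4 v5 v6 v7 v8 x : String) :
    (if (b && (v2 == "")) = true then (mkD v1 v2 v3 v4 v5 v6 v7 v8).insert "osName" x else mkD v1 v2 v3 v4 v5 v6 v7 v8)
      = mkD v1 (if (b && (v2 == "")) = true then x else v2) v3 v4 v5 v6 v7 v8 := by
  split <;> simp_all [ins_mk2]

lemma condUpd3 (b : Bool) (v1 v2 v3 v4 v5 v6 v7 v8 x : String) :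
    (if (b && (v3 == "")) = true then (mkD v1 v2 v3 v4 v5 v6 v7 v8).insert "osVersion" x else mkD v1 v2 v3 v4 v5 v6 v7 v8)
      = mkD v1 v2 (if (b && (v3 == "")) = true then x else v3) v4 v5 v6 v7 v8 := by
  split <;> simp_all [ins_mk3]

lemma condUpd4 (b : Bool) (v1 v2 v3 v4 v5 v6 v7 v8 x : String) :
    (if (b && (v4 == "")) = true then (mkD v1 v2 v3 v4 v5 v6 v7 v8).insert "osConfiguration" x else mkD v1 v2 v3 v4 v5 v6 v7 v8)
      = mkD v1 v2 v3 (if (b && (v4 == "")) = true then x else v4) v5 v6 v7 v8 := by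
  split <;> simp_all [ins_mk4]

lemma condUpd5 (b : Bool) (v1 v2 v3 v4 v5 v6 v7 v8 x : String) :
    (if (b && (v5 == "")) = true then (mkD v1 v2 v3 v4 v5 v6 v7 v8).insert "osManufacturer" x else mkD v1 v2 v3 v4 v5 v6 v7 v8)
      = mkD v1 v2 v3 v4 (if (b && (v5 == "")) = true then x else v5) v6 v7 v8 := by
  split <;> simp_all [ins_mk5]

lemma condUpd6 (b : Bool) (v1 v2 v3 v4 v5 v6 v7 v8 x : String) :
    (if (b && (v6 == "")) = true then (mkD v1 v2 v3 v4 v5 v6 v7 v8).insert "systemModel" x else mkD v1 v2 v3 v4 v5 v6 v7 v8)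
      = mkD v1 v2 v3 v4 v5 (if (b && (v6 == "")) = true then x else v6) v7 v8 := by
  split <;> simp_all [ins_mk6]

lemma condUpd7 (b : Bool) (v1 v2 v3 v4 v5 v6 v7 v8 x : String) :
    (if (b && (v7 == "")) = true then (mkD v1 v2 v3 v4 v5 v6 v7 v8).insert "systemType" x else mkD v1 v2 v3 v4 v5 v6 v7 v8)
      = mkD v1 v2 v3 v4 v5 v6 (if (b && (v7 == "")) = true then x else v7) v8 := by
  split <;> simp_all [ins_mk7]

lemma condUpd8 (b : Bool) (v1 v2 v3 v4 v5 v6 v7 v8 x : String) :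
    (if (b && (v8 == "")) = true then (mkD v1 v2 v3 v4 v5 v6 v7 v8).insert "domainName" x else mkD v1 v2 v3 v4 v5 v6 v7 v8)
      = mkD v1 v2 v3 v4 v5 v6 v7 (if (b && (v8 == "")) = true then x else v8) := by
  split <;> simp_all [ins_mk8]

set_option maxHeartbeats 2000000 in
lemma stepA_mkD (line v1 v2 v3 v4 v5 v6 v7 v8 : String) :
    pvStepA (mkD v1 v2 v3 v4 v5 v6 v7 v8) line =
    mkD (pvUpd v1 "Host Name:" line true) (pvUpd v2 "OS Name:" line false)
        (pvUpd v3 "OS Version:" line false) (pvUpd v4 "OS Configuration:" line false)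
        (pvUpd v5 "System Manufacturer:" line false) (pvUpd v6 "System Model:" line false)
        (pvUpd v7 "System Type:" line false) (pvUpd v8 "Domain:" line false) := by
  simp only [pvStepA, pvUpd, pvParse, if_true, Bool.false_eq_true, if_false]
  generalize PySem.Str.lower (PySem.Str.strip (PySem.Str.replace line "Host Name:" "")) = p1
  generalize PySem.Str.strip (PySem.Str.replace line "OS Name:" "") = p2
  generalize PySem.Str.strip (PySem.Str.replace line "OS Version:" "") = p3
  generalize PySem.Str.strip (PySem.Str.replace line "OS Configuration:" "") = p4
  generalize PySem.Str.strip (PySem.Str.replace line "System Manufacturer:" "") = p5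
  generalize PySem.Str.strip (PySem.Str.replace line "System Model:" "") = p6
  generalize PySem.Str.strip (PySem.Str.replace line "System Type:" "") = p7
  generalize PySem.Str.strip (PySem.Str.replace line "Domain:" "") = p8
  generalize PySem.Str.isIn "Host Name:" line = b1
  generalize PySem.Str.isIn "OS Name:" line = b2
  generalize PySem.Str.isIn "OS Version:" line = b3
  generalize PySem.Str.isIn "OS Configuration:" line = b4
  generalize PySem.Str.isIn "System Manufacturer:" line = b5
  generalize PySem.Str.isIn "System Model:" line = b6
  generalize PySem.Str.isIn "System Type:" line = b7
  generalize PySem.Str.isIn "Domain:" line = b8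
  simp only [getD_mk1, getD_mk2, getD_mk3, getD_mk4, getD_mk5, getD_mk6, getD_mk7, getD_mk8,
    condUpd1, condUpd2, condUpd3, condUpd4, condUpd5, condUpd6, condUpd7, condUpd8]

lemma pvOr_nil (v : String) : pvOr v "" = v := by
  unfold pvOr; split <;> simp_all

lemma pvFirstValue_cons (m line : String) (low : Bool) (rest : List String) :
    pvFirstValue m low (line :: rest) =
      if PySem.Str.isIn m line then
        (if pvParse line m low ≠ "" then pvParse line m low else pvFirstValue m low rest)
      else pvFirstValue m low rest := by
  cases low <;> simp [pvFirstValue, pvParse]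

lemma pvOr_step (v m line : String) (low : Bool) (rest : List String) :
    pvOr (pvUpd v m line low) (pvFirstValue m low rest)
      = pvOr v (pvFirstValue m low (line :: rest)) := by
  rw [pvFirstValue_cons]
  unfold pvUpd pvOr
  by_cases hv : v = "" <;> by_cases hin : PySem.Str.isIn m line <;>
    split_ifs <;> simp_all

lemma foldA_mkD (section_ : List String) (v1 v2 v3 v4 v5 v6 v7 v8 : String) :
    (section_.foldl pvStepA (mkD v1 v2 v3 v4 v5 v6 v7 v8)).items =
    [("hostname", pvOr v1 (pvFirstValue "Host Name:" true section_)),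
     ("osName", pvOr v2 (pvFirstValue "OS Name:" false section_)),
     ("osVersion", pvOr v3 (pvFirstValue "OS Version:" false section_)),
     ("osConfiguration", pvOr v4 (pvFirstValue "OS Configuration:" false section_)),
     ("osManufacturer", pvOr v5 (pvFirstValue "System Manufacturer:" false section_)),
     ("systemModel", pvOr v6 (pvFirstValue "System Model:" false section_)),
     ("systemType", pvOr v7 (pvFirstValue "System Type:" false section_)),
     ("domainName", pvOr v8 (pvFirstValue "Domain:" false section_))] := by
  induction section_ generalizing v1 v2 v3 v4 v5 v6 v7 v8 with
  | nil => simp [mkD, pvFirstValue, pvOr_nil]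
  | cons line rest ih =>
    rw [List.foldl_cons, stepA_mkD, ih]
    simp only [pvOr_step]

-- ===== VERDICT (by name: the statement is the Claim_ definition above) =====
theorem parseSystemSpecifications_spec : Claim_equal_parseSystemSpecifications := by
  intro section_ _
  show parseSystemSpecifications section_ = parseSystemSpecifications_alt section_
  show (section_.foldl pvStepA (mkD "" "" "" "" "" "" "" "")).items = _
  rw [foldA_mkD]
  simp [parseSystemSpecifications_alt, pvFields, pvOr]
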